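-- pv_equiv track=rewrite | github.com/amiller77/school_archive | 120_intro_python/street.py | install_vertical_sides
-- ===== SOURCE A (Python) =====
-- def install_vertical_sides(grid,accum):
--     """
--     Description: adds in side frames to existing grid
--     Parameters: grid,accum
--     Returns: grid
--     """
--     # base case:
--     if accum == -1:
--         return grid
--     grid[accum][0] = '|'
--     grid[accum][-1] = '|'
--     accum -= 1
--     grid = install_vertical_sides(grid,accum)
--     return grid
-- ===== SOURCE B (Python) =====
-- def install_vertical_sides(grid, accum):
--     """
--     Description: adds in side frames to existing grid (one forward pass
--     over the rows instead of A's backward recursion; same in-place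
--     mutation of grid and same return value).
--     """
--     for i, row in enumerate(grid):
--         if i <= accum:
--             row[0] = '|'
--             row[-1] = '|'
--     return grid
-- ===== Notes on version B (the rewrite author's own statement) =====
-- stated objective: idiomatic
-- what changed: Replaces A's backward recursion (from index accum down to -1, one stack frame per row) by a single forward enumerate loop that borders every row whose index is <= accum; Pre_ excludes exactly the inputs on which A raises (accum < -1, accum >= len(grid), or an empty row at an index <= accum).
import Mathlib
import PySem

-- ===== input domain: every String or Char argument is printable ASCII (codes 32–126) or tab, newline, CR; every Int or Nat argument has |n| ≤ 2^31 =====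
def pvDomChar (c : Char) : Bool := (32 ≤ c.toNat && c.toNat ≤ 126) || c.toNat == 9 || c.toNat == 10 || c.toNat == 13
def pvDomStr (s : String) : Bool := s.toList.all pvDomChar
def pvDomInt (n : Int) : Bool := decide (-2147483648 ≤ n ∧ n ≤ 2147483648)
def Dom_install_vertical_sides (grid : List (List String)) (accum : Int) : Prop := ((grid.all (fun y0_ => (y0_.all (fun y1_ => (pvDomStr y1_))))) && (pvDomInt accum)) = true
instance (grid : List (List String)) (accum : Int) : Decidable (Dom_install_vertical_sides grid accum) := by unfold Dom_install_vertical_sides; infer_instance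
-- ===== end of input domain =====

-- B replaces A's backward recursion by one forward pass over the rows (idiomatic);
-- both Pythons mutate grid's rows in place identically — the theorems are about the return value.

-- ===== PORT A =====
-- literal port of A's recursion; the `accum < -1` branch stubs inputs where Python A
-- always ends in an IndexError (excluded by Pre_), making the recursion total.
def install_vertical_sides (grid : List (List String)) (accum : Int) : List (List String) :=
  if accum = -1 then grid
  else if accum < -1 then grid  -- Python raises here; outside Pre_
  else
    -- grid[accum][0] = '|'
    let g1 := grid.set accum.toNat ((grid.getD accum.toNat []).set 0 "|")
    -- grid[accum][-1] = '|'
    let r1 := g1.getD accum.toNat []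
    let g2 := g1.set accum.toNat (r1.set (r1.length - 1) "|")
    install_vertical_sides g2 (accum - 1)
termination_by (accum + 1).toNat
decreasing_by omega

-- ===== PORT B =====
-- row[0] = '|'; row[-1] = '|'
def pvBordRow (row : List String) : List String :=
  let r1 := row.set 0 "|"
  r1.set (r1.length - 1) "|"

-- `for i, row in enumerate(grid): if i <= accum: …` as structural recursion carrying i
def pvAltGo (grid : List (List String)) (accum : Int) (i : Int) : List (List String) :=
  match grid with
  | [] => []
  | row :: rest => (if i ≤ accum then pvBordRow row else row) :: pvAltGo rest accum (i + 1)

def install_vertical_sides_alt (grid : List (List String)) (accum : Int) : List (List String) :=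
  pvAltGo grid accum 0

-- ===== PRECONDITION & SPEC =====
-- Pre_ admits exactly the inputs on which Python A returns: accum = -1, or
-- 0 ≤ accum < len(grid) with every row of index ≤ accum nonempty (else A raises IndexError).
def Pre_install_vertical_sides (grid : List (List String)) (accum : Int) : Prop :=
  -1 ≤ accum ∧ accum < grid.length ∧ ∀ i ∈ List.range (accum + 1).toNat, grid.getD i [] ≠ []
instance (grid : List (List String)) (accum : Int) : Decidable (Pre_install_vertical_sides grid accum) := by unfold Pre_install_vertical_sides; infer_instance
def pvWitness_install_vertical_sides : List (List String) × Int := ([["a", "b", "c"], ["d"]], 1)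

def Spec_install_vertical_sides (grid : List (List String)) (accum : Int) (out : List (List String)) : Prop := out = install_vertical_sides_alt grid accum
instance (grid : List (List String)) (accum : Int) (out : List (List String)) : Decidable (Spec_install_vertical_sides grid accum out) := by unfold Spec_install_vertical_sides; infer_instance

-- ===== CLAIM (what is proved, stated in full; the proofs are below) =====
def Claim_equal_install_vertical_sides : Prop := ∀ (grid : List (List String)) (accum : Int), Dom_install_vertical_sides grid accum → Pre_install_vertical_sides grid accum → Spec_install_vertical_sides grid accum (install_vertical_sides grid accum)

-- ===== LEMMAS AND PROOFS =====

-- rows beyond accum are untouched by B's pass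
lemma pvAltGo_of_lt (grid : List (List String)) (accum i : Int) (h : accum < i) :
    pvAltGo grid accum i = grid := by
  induction grid generalizing i with
  | nil => rfl
  | cons row rest ih =>
    simp only [pvAltGo, if_neg (by omega : ¬ i ≤ accum), ih (i + 1) (by omega)]

-- bordering row j by hand and then running B's pass with bound accum-1 is B's pass with bound accum
lemma pvAltGo_set (grid : List (List String)) (accum i : Int) (j : Nat)
    (hj : j < grid.length) (hij : i + j = accum) :
    pvAltGo (grid.set j (pvBordRow (grid.getD j []))) (accum - 1) i = pvAltGo grid accum i := by
  induction grid generalizing i j with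
  | nil => simp at hj
  | cons row rest ih =>
    cases j with
    | zero =>
      have hi : i = accum := by omega
      simp only [List.set, List.getD_cons_zero, pvAltGo,
        if_neg (by omega : ¬ i ≤ accum - 1), if_pos (by omega : i ≤ accum)]
      rw [pvAltGo_of_lt rest (accum - 1) (i + 1) (by omega),
        pvAltGo_of_lt rest accum (i + 1) (by omega)]
    | succ k =>
      have hk : k < rest.length := by simpa using hj
      simp only [List.set, List.getD_cons_succ, pvAltGo,
        if_pos (by omega : i ≤ accum - 1), if_pos (by omega : i ≤ accum), List.cons.injEq]
      exact ⟨trivial, ih (i + 1) k hk (by omega)⟩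

-- A's two in-place grid updates compose to one bordered-row update
lemma pvSetSet (grid : List (List String)) (a : Nat) (ha : a < grid.length) :
    (grid.set a ((grid.getD a []).set 0 "|")).set a
        (((grid.set a ((grid.getD a []).set 0 "|")).getD a []).set
          (((grid.set a ((grid.getD a []).set 0 "|")).getD a []).length - 1) "|")
      = grid.set a (pvBordRow (grid.getD a [])) := by
  simp [List.getD_eq_getElem?_getD, ha, List.set_set, pvBordRow]

lemma pvMain : ∀ (n : Nat) (accum : Int) (grid : List (List String)),
    (accum + 1).toNat = n → -1 ≤ accum → accum < grid.length →
    install_vertical_sides grid accum = pvAltGo grid accum 0 := by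
  intro n
  induction n with
  | zero =>
    intro accum grid hn h1 _
    have ha : accum = -1 := by omega
    rw [install_vertical_sides, if_pos ha, pvAltGo_of_lt grid accum 0 (by omega)]
  | succ n ih =>
    intro accum grid hn h1 h2
    have ha : 0 ≤ accum := by omega
    rw [install_vertical_sides, if_neg (by omega : ¬ accum = -1),
      if_neg (by omega : ¬ accum < -1)]
    have haN : (accum.toNat : Int) = accum := Int.toNat_of_nonneg ha
    have hlt : accum.toNat < grid.length := by omega
    dsimp only
    rw [pvSetSet grid accum.toNat hlt]
    rw [ih (accum - 1) (grid.set accum.toNat (pvBordRow (grid.getD accum.toNat [])))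
      (by omega) (by omega) (by simpa using (by omega : accum - 1 < (grid.length : Int)))]
    exact pvAltGo_set grid accum 0 accum.toNat hlt (by omega)

-- ===== VERDICT (by name: the statement is the Claim_ definition above) =====
theorem install_vertical_sides_spec : Claim_equal_install_vertical_sides := by
  intro grid accum _ hpre
  exact pvMain ((accum + 1).toNat) accum grid rfl hpre.1 hpre.2.1
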